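-- pv_equiv track=rewrite | github.com/blackbeardONE/QSDM | scripts/git_hook_pre_commit.py | any_match
-- ===== SOURCE A (Python) =====
-- def any_match(files: list[str], patterns: tuple[str, ...]) -> list[str]:
--     """Filter `files` to those that match (prefix or equal) any pattern.
--
--     Patterns ending with `/` match directory prefixes; others match
--     exact paths.
--     """
--     out: list[str] = []
--     for f in files:
--         for p in patterns:
--             if p.endswith("/"):
--                 if f.startswith(p):
--                     out.append(f)
--                     break
--             elif f == p:
--                 out.append(f)
--                 break
--     return out
-- ===== SOURCE B (Python) =====
-- def any_match(files: list[str], patterns: tuple[str, ...]) -> list[str]: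
--     # Pattern-major pass: each pattern marks the files it matches into a set,
--     # then one filter over files (preserving order, each at most once).
--     matched = set()
--     for p in patterns:
--         if p.endswith("/"):
--             matched.update(f for f in files if f.startswith(p))
--         else:
--             matched.update(f for f in files if f == p)
--     return [f for f in files if f in matched]
-- ===== Notes on version B (the rewrite author's own statement) =====
-- stated objective: alternative
-- what changed: Inverted loop nesting: instead of scanning all patterns per file with an in-loop break, B makes one pattern-major pass that collects every file matched by each pattern into a set, then filters files by one set-membership test each, preserving file order and per-occurrence output.
import Mathlib
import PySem

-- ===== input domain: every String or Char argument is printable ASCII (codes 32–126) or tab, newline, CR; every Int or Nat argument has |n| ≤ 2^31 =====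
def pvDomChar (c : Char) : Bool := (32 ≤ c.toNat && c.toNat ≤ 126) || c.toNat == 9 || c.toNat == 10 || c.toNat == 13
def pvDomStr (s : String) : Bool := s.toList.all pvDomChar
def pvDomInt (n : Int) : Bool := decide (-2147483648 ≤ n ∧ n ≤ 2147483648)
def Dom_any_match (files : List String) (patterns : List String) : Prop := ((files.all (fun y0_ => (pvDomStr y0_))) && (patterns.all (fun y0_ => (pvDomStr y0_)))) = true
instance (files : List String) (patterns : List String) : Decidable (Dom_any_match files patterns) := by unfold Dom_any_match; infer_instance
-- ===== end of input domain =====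

-- B inverts the loop nesting: one pass over PATTERNS collects all matched files into a set,
-- then one filter over files keeps order and uniqueness — an alternative decomposition of the same cost.

-- ===== PORT A =====
-- inner 'for p in patterns' loop with its appends and breaks, threading 'out'
def anyMatchInner (out : List String) (f : String) : List String → List String
  | [] => out
  | p :: ps =>
    if PySem.Str.endswith p "/" then
      if PySem.Str.startswith f p then out ++ [f] else anyMatchInner out f ps
    else if f == p then out ++ [f]
    else anyMatchInner out f ps

def any_match (files : List String) (patterns : List String) : List String :=
  files.foldl (fun out f => anyMatchInner out f patterns) []

-- ===== PORT B =====
def any_match_alt (files : List String) (patterns : List String) : List String :=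
  let matched : PySem.Set String :=
    patterns.foldl (fun s p =>
      if PySem.Str.endswith p "/" then
        PySem.Set.update s (files.filter (fun f => PySem.Str.startswith f p))
      else
        PySem.Set.update s (files.filter (fun f => f == p))) PySem.Set.empty
  files.filter (fun f => PySem.Set.contains matched f)

-- ===== PRECONDITION & SPEC =====
def Spec_any_match (files : List String) (patterns : List String) (out : List String) : Prop := out = any_match_alt files patterns
instance (files : List String) (patterns : List String) (out : List String) : Decidable (Spec_any_match files patterns out) := by unfold Spec_any_match; infer_instance

-- ===== CLAIM (what is proved, stated in full; the proofs are below) =====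
def Claim_equal_any_match : Prop := ∀ (files : List String) (patterns : List String), Dom_any_match files patterns → Spec_any_match files patterns (any_match files patterns)

-- ===== LEMMAS AND PROOFS =====

-- the per-file "some pattern matches f" test both sides compute
def bTest (patterns : List String) (f : String) : Bool :=
  patterns.any (fun p => if PySem.Str.endswith p "/" then PySem.Str.startswith f p else f == p)

theorem inner_eq (f : String) (ps : List String) (out : List String) :
    anyMatchInner out f ps = if bTest ps f then out ++ [f] else out := by
  induction ps with
  | nil => simp [anyMatchInner, bTest]
  | cons p ps ih =>
    by_cases hp : PySem.Chars.endswith p.toList ['/'] = true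
    · by_cases hs : PySem.Chars.startswith f.toList p.toList = true
      · simp [anyMatchInner, bTest, hp, hs]
      · simp [anyMatchInner, bTest, hp, hs, ih]
    · by_cases he : f = p
      · simp [anyMatchInner, bTest, hp, he]
      · simp [anyMatchInner, bTest, hp, he, ih]

theorem foldl_eq_filter (patterns : List String) (files : List String) (out : List String) :
    files.foldl (fun out f => anyMatchInner out f patterns) out = out ++ files.filter (bTest patterns) := by
  induction files generalizing out with
  | nil => simp
  | cons f fs ih =>
    rw [List.foldl_cons, inner_eq, List.filter_cons]
    by_cases h : bTest patterns f = true
    · simp [h, ih]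
    · have h' : bTest patterns f = false := by simp [h]
      simp [h', ih]

-- membership in B's matched set after folding over patterns
theorem mem_matched (files : List String) (f : String) (ps : List String) (s : PySem.Set String) :
    f ∈ ps.foldl (fun s p =>
      if PySem.Str.endswith p "/" then
        PySem.Set.update s (files.filter (fun f => PySem.Str.startswith f p))
      else
        PySem.Set.update s (files.filter (fun f => f == p))) s
    ↔ f ∈ s ∨ (f ∈ files ∧ bTest ps f = true) := by
  induction ps generalizing s with
  | nil => simp [bTest]
  | cons p ps ih =>
    rw [List.foldl_cons]
    by_cases hp : PySem.Chars.endswith p.toList ['/'] = true <;>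
      [rw [if_pos (by simpa [PySem.Str.endswith] using hp), ih];
       rw [if_neg (by simpa [PySem.Str.endswith] using hp), ih]] <;>
      simp [hp, PySem.Set.mem_update, bTest, List.mem_filter] <;> tauto

-- ===== VERDICT (by name: the statement is the Claim_ definition above) =====
theorem any_match_spec : Claim_equal_any_match := by
  intro files patterns _
  show any_match files patterns = any_match_alt files patterns
  unfold any_match any_match_alt
  rw [foldl_eq_filter, List.nil_append]
  apply List.filter_congr
  intro f hf
  rcases h : bTest patterns f with _ | _
  · rw [eq_comm, Bool.eq_false_iff]
    intro hc
    have := (PySem.Set.contains_iff _ f).mp hc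
    rw [mem_matched] at this
    rcases this with h' | ⟨_, h'⟩ <;> simp_all
  · symm
    apply (PySem.Set.contains_iff _ f).mpr
    rw [mem_matched]
    exact Or.inr ⟨hf, h⟩
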